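-- pv_equiv track=rewrite | github.com/armita-abedi/Matrix-Graph | Even_number_challange/evenNumberChallange.py | checkExclamation
-- ===== SOURCE A (Python) =====
-- def checkExclamation(string):
--
--     firstEven = False
--     exclamation = 0  # to count the exclamation points
--
--     for ch in string:
--         if ch == '!':
--             if firstEven:   # if the first even number has been already seen, increase the count of exclamation points
--                 exclamation += 1
--             else:
--                 exclamation = 0
--
--         elif ch >= '0' and ch <= '9':  # if the character is a digit
--             if int(ch) % 2 == 0:  # if the number is even
--                 if firstEven:    # if the first even numebr has been already seen, this would be the second even number
--                     if exclamation == 3: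
--                         return True
--                     else:
--                         exclamation = 0
--                 else:
--                     firstEven = True
--             else:
--                 firstEven = False   # When an odd number is seen, reset the count of excalamtion point
--                 exclamation = 0
--
--     return False
-- ===== SOURCE B (Python) =====
-- def checkExclamation(string):
--     # Keep only the characters that matter (digits and bangs); the answer is
--     # whether the filtered sequence contains a contiguous window even,'!','!','!',even.
--     t = [c for c in string if c == '!' or ('0' <= c <= '9')]
--     while len(t) >= 5:
--         if t[0] in '02468' and t[1] == '!' and t[2] == '!' and t[3] == '!' and t[4] in '02468':
--             return True
--         t = t[1:]
--     return False
-- ===== Notes on version B (the rewrite author's own statement) =====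
-- stated objective: simpler
-- what changed: replaces A's two-variable state machine (firstEven flag + exclamation counter with resets) by filtering the string down to digits and bangs and scanning that list for a contiguous window even,'!','!','!',even
import Mathlib
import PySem

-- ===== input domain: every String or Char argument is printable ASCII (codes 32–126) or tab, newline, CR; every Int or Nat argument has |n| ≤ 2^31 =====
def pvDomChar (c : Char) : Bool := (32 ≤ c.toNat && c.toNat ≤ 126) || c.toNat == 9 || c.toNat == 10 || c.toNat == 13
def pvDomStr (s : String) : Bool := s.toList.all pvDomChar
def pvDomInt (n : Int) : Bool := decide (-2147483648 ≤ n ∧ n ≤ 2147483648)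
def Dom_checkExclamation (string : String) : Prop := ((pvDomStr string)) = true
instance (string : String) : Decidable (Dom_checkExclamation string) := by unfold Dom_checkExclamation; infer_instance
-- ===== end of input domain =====

-- B replaces A's flag+counter state machine by a filter-then-window scan (simpler decomposition, same cost).

-- ===== PORT A =====
-- A's loop: state (firstEven, exclamation), early return on a completed pattern.
def pvLoopA : List Char → Bool → Int → Bool
  | [], _, _ => false
  | ch :: rest, firstEven, exclamation =>
    if ch == '!' then
      if firstEven then pvLoopA rest firstEven (exclamation + 1)
      else pvLoopA rest firstEven 0
    else if '0' ≤ ch ∧ ch ≤ '9' then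
      if (ch.toNat - '0'.toNat) % 2 = 0 then
        if firstEven then
          if exclamation = 3 then true
          else pvLoopA rest firstEven 0
        else pvLoopA rest true exclamation
      else pvLoopA rest false 0
    else pvLoopA rest firstEven exclamation

def checkExclamation (string : String) : Bool := pvLoopA string.toList false 0

-- ===== PORT B =====
-- Source B: keep only digits and '!' …
def pvKeep (c : Char) : Bool := c == '!' || decide ('0' ≤ c ∧ c ≤ '9')
-- … `c in '02468'`
def pvEven (c : Char) : Bool := c == '0' || c == '2' || c == '4' || c == '6' || c == '8'
-- … Source B's while-loop: test the first five elements, else drop the head (t = t[1:]).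
def pvScanB : List Char → Bool
  | e1 :: b1 :: b2 :: b3 :: e2 :: rest =>
    (pvEven e1 && b1 == '!' && b2 == '!' && b3 == '!' && pvEven e2) || pvScanB (b1 :: b2 :: b3 :: e2 :: rest)
  | _ => false

def checkExclamation_alt (string : String) : Bool := pvScanB (string.toList.filter pvKeep)

-- ===== PRECONDITION & SPEC =====
def Spec_checkExclamation (string : String) (out : Bool) : Prop := out = checkExclamation_alt string
instance (string : String) (out : Bool) : Decidable (Spec_checkExclamation string out) := by unfold Spec_checkExclamation; infer_instance

-- ===== CLAIM (what is proved, stated in full; the proofs are below) =====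
def Claim_equal_checkExclamation : Prop := ∀ (string : String), Dom_checkExclamation string → Spec_checkExclamation string (checkExclamation string)

-- ===== LEMMAS AND PROOFS =====

-- what A's counter tracks, phrased on the raw list: exclamation points seen so far (ex),
-- remaining chars must contribute bangs up to exactly 3 before the next digit, which must be even
def pvAux : List Char → Int → Bool
  | [], _ => false
  | c :: r, ex =>
    if c == '!' then pvAux r (ex + 1)
    else if '0' ≤ c ∧ c ≤ '9' then ((c.toNat - '0'.toNat) % 2 = 0 : Bool) && (ex = 3 : Bool)
    else pvAux r ex

-- "starts with exactly k bangs, then an even digit"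
def pvBte : List Char → Int → Bool
  | [], _ => false
  | c :: r, k => if c == '!' then pvBte r (k - 1) else pvEven c && (k = 0 : Bool)

def pvFirstW : List Char → Bool
  | b1 :: b2 :: b3 :: e :: _ => b1 == '!' && b2 == '!' && b3 == '!' && pvEven e
  | _ => false

theorem pvEven_eq_parity (c : Char) (h1 : '0' ≤ c) (h2 : c ≤ '9') :
    (((c.toNat - '0'.toNat) % 2 = 0 : Bool)) = pvEven c := by
  have h1' : 48 ≤ c.toNat := h1
  have h2' : c.toNat ≤ 57 := h2
  have hofn : Char.ofNat c.toNat = c := Char.ofNat_toNat c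
  interval_cases h : c.toNat <;> rw [← hofn] <;> decide

theorem pvBte_neg (u : List Char) : ∀ k : Int, k < 0 → pvBte u k = false := by
  induction u with
  | nil => intro k _; rfl
  | cons c r ih =>
    intro k hk
    simp only [pvBte]
    split
    · exact ih (k - 1) (by omega)
    · simp; omega

theorem pvAux_eq_bte (r : List Char) : ∀ ex : Int,
    pvAux r ex = pvBte (r.filter pvKeep) (3 - ex) := by
  induction r with
  | nil => intro ex; rfl
  | cons c r ih =>
    intro ex
    by_cases hb : c = '!'
    · subst hb
      have hkeep : pvKeep '!' = true := by decide
      simp only [pvAux, List.filter, hkeep, pvBte, BEq.rfl, if_true]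
      rw [ih (ex + 1)]
      congr 1
      ring
    · by_cases hd : '0' ≤ c ∧ c ≤ '9'
      · have hkeep : pvKeep c = true := by simp [pvKeep, hd]
        simp only [pvAux, List.filter, hkeep, pvBte]
        rw [if_neg (by simp [hb]), if_pos hd, if_neg (by simp [hb])]
        rw [pvEven_eq_parity c hd.1 hd.2]
        congr 1
        simp only [decide_eq_decide]
        omega
      · have hkeep : pvKeep c = false := by simp [pvKeep, hb, hd]
        simp only [pvAux, List.filter, hkeep]
        rw [if_neg (by simp [hb]), if_neg hd]
        exact ih ex

theorem pvBte_three (u : List Char) : pvBte u 3 = pvFirstW u := by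
  match u with
  | [] => rfl
  | [c] => simp only [pvBte, pvFirstW]; split_ifs <;> norm_num
  | [c, c2] => simp only [pvBte, pvFirstW]; split_ifs <;> norm_num
  | [c, c2, c3] => simp only [pvBte, pvFirstW]; split_ifs <;> norm_num
  | c1 :: c2 :: c3 :: c4 :: rest =>
    simp only [pvBte, pvFirstW]
    by_cases h1 : c1 = '!'
    · subst h1; rw [if_pos (by simp)]
      by_cases h2 : c2 = '!'
      · subst h2; rw [if_pos (by simp)]
        by_cases h3 : c3 = '!'
        · subst h3; rw [if_pos (by simp)]
          by_cases h4 : c4 = '!'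
          · subst h4; rw [if_pos (by simp)]
            rw [pvBte_neg rest (3 - 1 - 1 - 1 - 1) (by norm_num)]
            decide
          · rw [if_neg (by simp [h4])]; norm_num [h4]
        · rw [if_neg (by simp [h3])]; norm_num [h3]
      · rw [if_neg (by simp [h2])]; norm_num [h2]
    · rw [if_neg (by simp [h1])]; norm_num [h1]

theorem pvScanB_cons (c : Char) (u : List Char) :
    pvScanB (c :: u) = ((pvEven c && pvFirstW u) || pvScanB u) := by
  match u with
  | [] => simp [pvScanB, pvFirstW]
  | [a] => simp [pvScanB, pvFirstW]
  | [a, b] => simp [pvScanB, pvFirstW]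
  | [a, b, d] => simp [pvScanB, pvFirstW]
  | a :: b :: d :: e :: rest => simp [pvScanB, pvFirstW, Bool.and_assoc]

theorem pvLoopA_eq (t : List Char) : ∀ (fe : Bool) (ex : Int), (fe = false → ex = 0) →
    pvLoopA t fe ex = (pvScanB (t.filter pvKeep) || (fe && pvAux t ex)) := by
  induction t with
  | nil => intro fe ex _; simp [pvLoopA, pvScanB, pvAux]
  | cons c r ih =>
    intro fe ex hinv
    by_cases hb : c = '!'
    · subst hb
      have hkeep : pvKeep '!' = true := by decide
      simp only [pvLoopA, List.filter, hkeep, pvAux, pvScanB_cons]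
      have hne : pvEven '!' = false := by decide
      cases fe with
      | false =>
        rw [ih false 0 (fun _ => rfl)]
        simp [hne]
      | true =>
        rw [if_pos rfl, ih true (ex + 1) (by simp)]
        simp [hne]
    · by_cases hd : '0' ≤ c ∧ c ≤ '9'
      · have hkeep : pvKeep c = true := by simp [pvKeep, hd]
        have hnb : (c == '!') = false := by simp [hb]
        simp only [pvLoopA, List.filter, hkeep, pvAux, hnb, Bool.false_eq_true, if_false,
          if_pos hd, pvScanB_cons]
        by_cases hev : (c.toNat - '0'.toNat) % 2 = 0
        · have hevB : pvEven c = true := by rw [← pvEven_eq_parity c hd.1 hd.2]; exact decide_eq_true hev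
          have hev48 : (c.toNat - 48) % 2 = 0 := hev
          rw [if_pos hev]
          have hfw : pvFirstW (List.filter pvKeep r) = pvAux r 0 := by
            rw [pvAux_eq_bte r 0]
            norm_num [pvBte_three]
          cases fe with
          | false =>
            rw [ih true ex (by simp)]
            rw [hinv rfl]
            simp [hevB, hfw, Bool.or_comm]
          | true =>
            by_cases h3 : ex = 3
            · rw [if_pos rfl, if_pos h3]
              simp [hevB, h3, hev48]
            · rw [if_pos rfl, if_neg h3, ih true 0 (by simp)]
              simp [hevB, hfw, h3, Bool.or_comm]
        · have hevB : pvEven c = false := by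
            rw [← pvEven_eq_parity c hd.1 hd.2]; exact decide_eq_false hev
          have hev48 : (c.toNat - 48) % 2 = 1 := by
            have : ¬ (c.toNat - 48) % 2 = 0 := hev
            omega
          rw [if_neg hev, ih false 0 (fun _ => rfl)]
          simp [hevB, hev48]
      · have hkeep : pvKeep c = false := by simp [pvKeep, hb, hd]
        have hnb : (c == '!') = false := by simp [hb]
        simp only [pvLoopA, List.filter, hkeep, pvAux, hnb, Bool.false_eq_true, if_false,
          if_neg hd]
        exact ih fe ex hinv

-- ===== VERDICT (by name: the statement is the Claim_ definition above) =====
theorem checkExclamation_spec : Claim_equal_checkExclamation := by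
  intro s _
  unfold Spec_checkExclamation checkExclamation checkExclamation_alt
  rw [pvLoopA_eq s.toList false 0 (fun _ => rfl)]
  simp
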